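-- pv_equiv track=rewrite | github.com/AdrianSuliga/WDI | Kolokwia/ex_B1_21-22.py | areTheyGood
-- ===== SOURCE A (Python) =====
-- def areTheyGood(a, b):
--     ADigits = [0 for _ in range(4)]
--     BDigits = [0 for _ in range(4)]
--
--     while a != 0:
--         ADigits[a % 4] += 1
--         a //= 4
--     while b != 0:
--         BDigits[b % 4] += 1
--         b //= 4
--     for i in range(4):
--         if (ADigits[i] == 0 and BDigits[i] != 0) or (ADigits[i] != 0 and BDigits[i] == 0):
--             return False
--     return True
-- ===== SOURCE B (Python) =====
-- def areTheyGood(a, b):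
--     def mask(n):
--         # 4-bit presence bitmask of the base-4 digits of n, by recursion
--         return 0 if n == 0 else mask(n // 4) | (1 << (n % 4))
--     return mask(a) == mask(b)
-- ===== Notes on version B (the rewrite author's own statement) =====
-- stated objective: alternative
-- what changed: Replaces A's two 4-bucket count arrays plus a final index-by-index comparison loop with a recursive function folding each number into a single 4-bit presence bitmask (1 << digit, OR-combined), finishing with one integer equality.
import Mathlib
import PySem

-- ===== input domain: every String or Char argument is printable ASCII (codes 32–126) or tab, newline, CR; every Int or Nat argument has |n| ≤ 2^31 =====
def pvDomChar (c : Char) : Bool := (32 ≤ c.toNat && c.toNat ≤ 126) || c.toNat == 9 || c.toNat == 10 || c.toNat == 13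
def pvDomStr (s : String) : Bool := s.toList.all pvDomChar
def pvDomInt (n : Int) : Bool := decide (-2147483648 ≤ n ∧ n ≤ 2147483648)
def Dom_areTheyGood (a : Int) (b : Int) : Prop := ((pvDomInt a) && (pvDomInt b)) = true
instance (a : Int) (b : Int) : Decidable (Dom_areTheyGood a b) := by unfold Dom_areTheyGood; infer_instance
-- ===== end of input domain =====

-- B replaces A's two 4-bucket count arrays and final index-by-index comparison loop
-- with a recursive 4-bit presence bitmask per number and one integer equality (objective: alternative).

-- ===== PORT A =====
-- 'while a != 0: ADigits[a % 4] += 1; a //= 4'. The guard '0 < n' is a totality guard: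
-- on Pre_ inputs the loop variable stays nonnegative, so it coincides with Python's
-- 'n != 0' (for negative n the Python loop never terminates and Pre_ excludes it).
def countDigits (n : Int) (cnt : List Int) : List Int :=
  if h : 0 < n then
    countDigits (PySem.Int.floordiv n 4)
      (PySem.List.pySetD cnt (PySem.Int.mod n 4)
        (PySem.List.pyGetD cnt (PySem.Int.mod n 4) 0 + 1))
  else cnt
termination_by n.toNat
decreasing_by
  have h1 : PySem.Int.floordiv n 4 < n :=
    (PySem.Int.floordiv_lt_iff_lt_mul (by omega)).mpr (by linarith)
  omega

-- 'for i in range(4): if (A[i]==0 and B[i]!=0) or (A[i]!=0 and B[i]==0): return False'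
def checkPass (A B : List Int) : List Int → Bool
  | [] => true
  | i :: rest =>
    if (PySem.List.pyGetD A i 0 == 0 && PySem.List.pyGetD B i 0 != 0)
        || (PySem.List.pyGetD A i 0 != 0 && PySem.List.pyGetD B i 0 == 0)
    then false
    else checkPass A B rest

def areTheyGood (a : Int) (b : Int) : Bool :=
  checkPass (countDigits a [0, 0, 0, 0]) (countDigits b [0, 0, 0, 0])
    (PySem.List.pyRange 0 4 1)

-- ===== PORT B =====
-- Python's '|' and '<<' on ints: exact for nonnegative operands (where they agree with
-- the Nat operations); B only ever applies them to nonnegative values.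
def pyOr (x y : Int) : Int := Int.ofNat (x.toNat ||| y.toNat)
def pyShl (x y : Int) : Int := Int.ofNat (x.toNat <<< y.toNat)

-- 'return 0 if n == 0 else mask(n // 4) | (1 << (n % 4))' — for negative n Python's
-- recursion never terminates (n //= 4 stabilises at -1), so the guard '0 < n' is the
-- same totality guard as in port A; Pre_ excludes negatives.
def bMask (n : Int) : Int :=
  if h : 0 < n then
    pyOr (bMask (PySem.Int.floordiv n 4)) (pyShl 1 (PySem.Int.mod n 4))
  else 0
termination_by n.toNat
decreasing_by
  have h1 : PySem.Int.floordiv n 4 < n :=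
    (PySem.Int.floordiv_lt_iff_lt_mul (by omega)).mpr (by linarith)
  omega

def areTheyGood_alt (a : Int) (b : Int) : Bool := bMask a == bMask b

-- ===== PRECONDITION & SPEC =====
-- Pre_ excludes negative arguments, on which Python A's while loop never terminates
-- (a //= 4 stabilises at -1), so A returns no value there.
def Pre_areTheyGood (a : Int) (b : Int) : Prop := 0 ≤ a ∧ 0 ≤ b
instance (a : Int) (b : Int) : Decidable (Pre_areTheyGood a b) := by
  unfold Pre_areTheyGood; infer_instance

def pvWitness_areTheyGood : Int × Int := (5, 20)

def Spec_areTheyGood (a : Int) (b : Int) (out : Bool) : Prop := out = areTheyGood_alt a b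
instance (a : Int) (b : Int) (out : Bool) : Decidable (Spec_areTheyGood a b out) := by
  unfold Spec_areTheyGood; infer_instance

-- ===== CLAIM (what is proved, stated in full; the proofs are below) =====
def Claim_equal_areTheyGood : Prop :=
  ∀ (a : Int) (b : Int), Dom_areTheyGood a b → Pre_areTheyGood a b →
    Spec_areTheyGood a b (areTheyGood a b)

-- ===== LEMMAS AND PROOFS =====

-- reference list of the base-4 digits of n (proof-side helper only)
def digs (n : Int) : List Int :=
  if h : 0 < n then PySem.Int.mod n 4 :: digs (PySem.Int.floordiv n 4) else []
termination_by n.toNat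
decreasing_by
  have h1 : PySem.Int.floordiv n 4 < n :=
    (PySem.Int.floordiv_lt_iff_lt_mul (by omega)).mpr (by linarith)
  omega

lemma digs_bound (n : Int) : ∀ i ∈ digs n, 0 ≤ i ∧ i < 4 := by
  induction n using digs.induct with
  | case1 n h ih =>
    intro i hi
    rw [digs, dif_pos h] at hi
    rcases List.mem_cons.mp hi with rfl | hi
    · exact ⟨PySem.Int.mod_nonneg n (by omega), PySem.Int.mod_lt n (by omega)⟩
    · exact ih i hi
  | case2 n _h =>
    intro i hi
    rw [digs, dif_neg _h] at hi
    simp at hi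

lemma countDigits_bucket (n : Int) (cnt : List Int) (i : Int)
    (hlen : cnt.length = 4)
    (hpos : ∀ j : Int, 0 ≤ j → j < 4 → 0 ≤ PySem.List.pyGetD cnt j 0)
    (h0 : 0 ≤ i) (h4 : i < 4) :
    (PySem.List.pyGetD (countDigits n cnt) i 0 ≠ 0 ↔
      PySem.List.pyGetD cnt i 0 ≠ 0 ∨ i ∈ digs n) := by
  induction n, cnt using countDigits.induct with
  | case1 n cnt h ih =>
    rw [countDigits, dif_pos h, digs, dif_pos h]
    have hm0 : (0 : Int) ≤ PySem.Int.mod n 4 := PySem.Int.mod_nonneg n (by omega)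
    have hm4 : PySem.Int.mod n 4 < 4 := PySem.Int.mod_lt n (by omega)
    have hget : ∀ (j : Int), 0 ≤ j → j < 4 →
        PySem.List.pyGetD (PySem.List.pySetD cnt (PySem.Int.mod n 4)
          (PySem.List.pyGetD cnt (PySem.Int.mod n 4) 0 + 1)) j 0 =
        (if j = PySem.Int.mod n 4 then PySem.List.pyGetD cnt (PySem.Int.mod n 4) 0 + 1
         else PySem.List.pyGetD cnt j 0) := by
      intro j hj0 hj4
      rw [PySem.List.pySetD_of_nonneg _ _ hm0,
          PySem.List.pyGetD_of_nonneg _ _ hj0,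
          PySem.List.pyGetD_of_nonneg _ _ hj0]
      rw [List.getD_eq_getElem?_getD, List.getD_eq_getElem?_getD, List.getElem?_set]
      by_cases hje : j = PySem.Int.mod n 4
      · have he : (PySem.Int.mod n 4).toNat = j.toNat := by omega
        have hlt : (PySem.Int.mod n 4).toNat < cnt.length := by omega
        rw [if_pos he, if_pos hlt, if_pos hje]
        rfl
      · have he : ¬ (PySem.Int.mod n 4).toNat = j.toNat := by omega
        rw [if_neg he, if_neg hje]
    have hlen' : (PySem.List.pySetD cnt (PySem.Int.mod n 4)
        (PySem.List.pyGetD cnt (PySem.Int.mod n 4) 0 + 1)).length = 4 := by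
      rw [PySem.List.length_pySetD]; exact hlen
    have hpos' : ∀ j : Int, 0 ≤ j → j < 4 →
        0 ≤ PySem.List.pyGetD (PySem.List.pySetD cnt (PySem.Int.mod n 4)
          (PySem.List.pyGetD cnt (PySem.Int.mod n 4) 0 + 1)) j 0 := by
      intro j hj0 hj4
      rw [hget j hj0 hj4]
      by_cases hje : j = PySem.Int.mod n 4
      · rw [if_pos hje]; have := hpos _ hm0 hm4; omega
      · rw [if_neg hje]; exact hpos j hj0 hj4
    rw [ih hlen' hpos', hget i h0 h4]
    by_cases hie : i = PySem.Int.mod n 4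
    · subst hie
      rw [if_pos rfl]
      have := hpos _ hm0 hm4
      constructor
      · intro _; right; simp
      · intro _; left; omega
    · rw [if_neg hie]
      simp only [List.mem_cons]
      tauto
  | case2 n cnt _h =>
    rw [countDigits, dif_neg _h, digs, dif_neg _h]
    simp

lemma checkPass_true_iff (A B : List Int) (l : List Int) :
    checkPass A B l = true ↔
      ∀ i ∈ l, (PySem.List.pyGetD A i 0 = 0 ↔ PySem.List.pyGetD B i 0 = 0) := by
  induction l with
  | nil => simp [checkPass]
  | cons i rest ih =>
    rw [checkPass]
    by_cases hc : ((PySem.List.pyGetD A i 0 == 0 && PySem.List.pyGetD B i 0 != 0)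
        || (PySem.List.pyGetD A i 0 != 0 && PySem.List.pyGetD B i 0 == 0)) = true
    · rw [if_pos hc]
      simp only [Bool.or_eq_true, Bool.and_eq_true, beq_iff_eq, bne_iff_ne] at hc
      simp only [List.mem_cons]
      constructor
      · intro hfalse; cases hfalse
      · intro H
        have := H i (Or.inl rfl)
        tauto
    · rw [if_neg hc, ih]
      simp only [Bool.or_eq_true, Bool.and_eq_true, beq_iff_eq, bne_iff_ne,
        not_or, not_and] at hc
      simp only [List.mem_cons]
      constructor
      · intro H j hj
        rcases hj with rfl | hj
        · tauto
        · exact H j hj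
      · intro H j hj
        exact H j (Or.inr hj)

lemma zero_bucket (i : Int) (h0 : 0 ≤ i) (h4 : i < 4) :
    PySem.List.pyGetD ([0, 0, 0, 0] : List Int) i 0 = 0 := by
  have : i = 0 ∨ i = 1 ∨ i = 2 ∨ i = 3 := by omega
  rcases this with rfl | rfl | rfl | rfl <;> decide

lemma bMask_nonneg (n : Int) : 0 ≤ bMask n := by
  rw [bMask]
  split
  · exact Int.natCast_nonneg _
  · exact le_refl 0

lemma toNat_ofNat_eq (x : Nat) : (Int.ofNat x).toNat = x := rfl

lemma bMask_testBit (n : Int) (j : Nat) :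
    (bMask n).toNat.testBit j = true ↔ (j : Int) ∈ digs n := by
  induction n using bMask.induct with
  | case1 n h ih =>
    rw [bMask, dif_pos h, digs, dif_pos h]
    have hm0 : (0 : Int) ≤ PySem.Int.mod n 4 := PySem.Int.mod_nonneg n (by omega)
    have hm4 : PySem.Int.mod n 4 < 4 := PySem.Int.mod_lt n (by omega)
    simp only [pyOr, pyShl, toNat_ofNat_eq, Nat.testBit_or, Nat.testBit_shiftLeft,
      List.mem_cons, Bool.or_eq_true, Bool.and_eq_true, decide_eq_true_eq]
    rw [ih]
    have h1 : ∀ k : Nat, Nat.testBit (Int.toNat 1) k = true ↔ k = 0 := by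
      intro k
      have : Int.toNat 1 = 1 := rfl
      rw [this, Nat.testBit_one_eq_true_iff_self_eq_zero]
    constructor
    · rintro (hj | ⟨hle, ht⟩)
      · exact Or.inr hj
      · rw [h1] at ht
        left
        omega
    · rintro (hj | hj)
      · right
        refine ⟨by omega, ?_⟩
        rw [h1]
        omega
      · exact Or.inl hj
  | case2 n _h =>
    rw [bMask, dif_neg _h, digs, dif_neg _h]
    simp

lemma bMask_eq_iff (a b : Int) :
    (bMask a = bMask b) ↔ ∀ j : Nat, ((j : Int) ∈ digs a ↔ (j : Int) ∈ digs b) := by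
  constructor
  · intro h j
    rw [← bMask_testBit, ← bMask_testBit, h]
  · intro H
    have ha := bMask_nonneg a
    have hb := bMask_nonneg b
    have : (bMask a).toNat = (bMask b).toNat := by
      apply Nat.eq_of_testBit_eq
      intro j
      have hj := H j
      rw [← bMask_testBit a j, ← bMask_testBit b j] at hj
      by_cases h1 : (bMask a).toNat.testBit j = true
      · rw [h1, (hj.mp h1)]
      · have h2 : ¬ (bMask b).toNat.testBit j = true := fun h2 => h1 (hj.mpr h2)
        simp only [Bool.not_eq_true] at h1 h2
        rw [h1, h2]
    omega

-- ===== VERDICT (by name: the statement is the Claim_ definition above) =====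
theorem areTheyGood_spec : Claim_equal_areTheyGood := by
  intro a b _hdom hpre
  obtain ⟨ha, hb⟩ := hpre
  unfold Spec_areTheyGood
  have hposz : ∀ j : Int, 0 ≤ j → j < 4 →
      0 ≤ PySem.List.pyGetD ([0, 0, 0, 0] : List Int) j 0 := by
    intro j hj0 hj4; rw [zero_bucket j hj0 hj4]
  have hA : ∀ i : Int, 0 ≤ i → i < 4 →
      (PySem.List.pyGetD (countDigits a [0, 0, 0, 0]) i 0 ≠ 0 ↔ i ∈ digs a) := by
    intro i h0 h4
    rw [countDigits_bucket a _ i rfl hposz h0 h4, zero_bucket i h0 h4]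
    tauto
  have hB : ∀ i : Int, 0 ≤ i → i < 4 →
      (PySem.List.pyGetD (countDigits b [0, 0, 0, 0]) i 0 ≠ 0 ↔ i ∈ digs b) := by
    intro i h0 h4
    rw [countDigits_bucket b _ i rfl hposz h0 h4, zero_bucket i h0 h4]
    tauto
  rw [Bool.eq_iff_iff]
  have hrange : PySem.List.pyRange 0 4 1 = ([0, 1, 2, 3] : List Int) := by decide
  rw [areTheyGood, hrange, checkPass_true_iff, areTheyGood_alt, beq_iff_eq,
    bMask_eq_iff]
  constructor
  · intro H j
    constructor
    · intro hx
      obtain ⟨hx0, hx4⟩ := digs_bound a _ hx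
      have hxin : (j : Int) ∈ ([0, 1, 2, 3] : List Int) := by
        simp only [List.mem_cons, List.not_mem_nil, or_false]; omega
      have := H _ hxin
      have h1 := hA _ hx0 hx4
      have h2 := hB _ hx0 hx4
      tauto
    · intro hx
      obtain ⟨hx0, hx4⟩ := digs_bound b _ hx
      have hxin : (j : Int) ∈ ([0, 1, 2, 3] : List Int) := by
        simp only [List.mem_cons, List.not_mem_nil, or_false]; omega
      have := H _ hxin
      have h1 := hA _ hx0 hx4
      have h2 := hB _ hx0 hx4
      tauto
  · intro H i hi
    have hb4 : 0 ≤ i ∧ i < 4 := by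
      simp only [List.mem_cons, List.not_mem_nil, or_false] at hi
      rcases hi with rfl | rfl | rfl | rfl <;> omega
    have hcast : ((i.toNat : Nat) : Int) = i := by omega
    have := H i.toNat
    rw [hcast] at this
    have h1 := hA i hb4.1 hb4.2
    have h2 := hB i hb4.1 hb4.2
    tauto
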